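-- pv_equiv track=rewrite | github.com/QishenDatui/WordFrequency | verbsphrase.py | comprise_morewords
-- ===== SOURCE A (Python) =====
-- def comprise_morewords(line, pharse):
--     length = len(line) - pharse + 1
--     result = []
--     lens = [0] * pharse
--     i = 0
--     j = 0
--     temp = ''
--     while i < length:
--         while j < pharse:
--             if line[i + j][0] > 'z' or line[i + j][0] < 'a':
--                 i = i + j
--                 j = 0
--                 temp=''
--                 break
--             temp = temp + line[i + j] + ' '
--             lens[j] = len(line[i+j])
--             j = j + 1
--         if j==pharse:
--             j = pharse - 1
--             result.append(temp[:-1])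
--             temp = temp[lens[0]+1:]
--             for k in range(pharse-1):
--                 lens[k] = lens[k+1]
--         i = i + 1
--     return result
-- ===== SOURCE B (Python) =====
-- def comprise_morewords(line, pharse):
--     # Direct windowing: keep every window of `pharse` consecutive words whose
--     # words all start with a lowercase letter; no sliding state is maintained.
--     if pharse < 1:
--         return []
--     return [' '.join(line[s:s + pharse])
--             for s in range(len(line) - pharse + 1)
--             if all('a' <= w[0] <= 'z' for w in line[s:s + pharse])]
-- ===== Notes on version B (the rewrite author's own statement) =====
-- stated objective: simpler
-- what changed: Replaces A's incremental sliding-window state machine (temp string trimming, lens length-shifting, break/jump index resets) with a direct comprehension over all window start positions that joins each window whose words all start with a lowercase letter.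
import Mathlib
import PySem

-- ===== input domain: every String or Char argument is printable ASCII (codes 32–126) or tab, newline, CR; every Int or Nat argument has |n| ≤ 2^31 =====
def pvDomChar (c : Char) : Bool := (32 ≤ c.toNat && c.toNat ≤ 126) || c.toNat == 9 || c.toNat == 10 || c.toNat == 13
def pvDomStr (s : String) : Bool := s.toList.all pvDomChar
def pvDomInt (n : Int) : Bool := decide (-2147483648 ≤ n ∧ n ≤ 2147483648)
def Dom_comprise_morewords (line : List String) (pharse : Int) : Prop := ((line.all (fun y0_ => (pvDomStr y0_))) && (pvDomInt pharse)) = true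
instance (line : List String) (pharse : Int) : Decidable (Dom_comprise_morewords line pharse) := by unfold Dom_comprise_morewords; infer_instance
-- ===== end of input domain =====

-- B replaces A's incremental sliding-window state machine (temp/lens shifting, break/jump
-- resets) by a direct comprehension over all window start positions; objective: simpler.


-- ===== PORT A =====
-- inner `while j < pharse` loop; `fuel` is only a termination bound ((pharse-j).toNat at
-- every call site, exactly the number of remaining iterations), the state is (i, j, temp, lens).
def cmAInner (line : List String) (pharse : Int) : Nat → Int → Int → List Char → List Int →
    (Int × Int × List Char × List Int)
  | 0, i, j, temp, lens => (i, j, temp, lens)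
  | fuel+1, i, j, temp, lens =>
    if j < pharse then
      let w := ((PySem.List.pyGet? line (i + j)).getD "").toList  -- line[i+j]; in range on every reached access
      let c := (PySem.List.pyGet? w 0).getD ' '                   -- line[i+j][0]; Pre_ keeps reached words nonempty
      if c > 'z' ∨ c < 'a' then (i + j, 0, [], lens)              -- the `break` branch
      else cmAInner line pharse fuel i (j + 1) (temp ++ w ++ [' '])
        (PySem.List.pySetD lens j (w.length : Int))               -- lens[j] = len(line[i+j])
    else (i, j, temp, lens)

-- outer `while i < length` loop; `fuel` is only a termination bound (`length.toNat`
-- suffices since i strictly increases each iteration while i < length).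
def cmAOuter (line : List String) (pharse length : Int) : Nat → Int → Int → List Char → List Int →
    List String → List String
  | 0, _, _, _, _, result => result
  | fuel+1, i, j, temp, lens, result =>
    if i < length then
      let st := cmAInner line pharse (pharse - j).toNat i j temp lens   -- st = (i, j, temp, lens) after the inner loop
      if st.2.1 = pharse then
        let result' := result ++ [String.ofList (PySem.List.slice st.2.2.1 none (some (-1)))]  -- result.append(temp[:-1])
        let temp'' := PySem.List.slice st.2.2.1 (some (PySem.List.pyGetD st.2.2.2 0 0 + 1)) none  -- temp = temp[lens[0]+1:]
        let lens'' := (PySem.List.pyRange 0 (pharse - 1) 1).foldl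
            (fun ls k => PySem.List.pySetD ls k (PySem.List.pyGetD ls (k + 1) 0)) st.2.2.2    -- for k in range(pharse-1): lens[k] = lens[k+1]
        cmAOuter line pharse length fuel (st.1 + 1) (pharse - 1) temp'' lens'' result'
      else
        cmAOuter line pharse length fuel (st.1 + 1) st.2.1 st.2.2.1 st.2.2.2 result
    else result

def comprise_morewords (line : List String) (pharse : Int) : List String :=
  let length : Int := (line.length : Int) - pharse + 1
  let lens : List Int := List.replicate pharse.toNat 0            -- [0] * pharse
  cmAOuter line pharse length length.toNat 0 0 [] lens []

-- ===== PORT B =====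
-- 'a' <= w[0] <= 'z'  (w[0] raises on the empty word; Pre_ keeps reached words nonempty)
def cmBOk (w : String) : Bool :=
  let c := (PySem.List.pyGet? w.toList 0).getD ' '
  decide ('a' ≤ c ∧ c ≤ 'z')

def comprise_morewords_alt (line : List String) (pharse : Int) : List String :=
  if pharse < 1 then []
  else
    ((PySem.List.pyRange 0 ((line.length : Int) - pharse + 1) 1).filter
        (fun s => (PySem.List.slice line (some s) (some (s + pharse))).all cmBOk)).map
      (fun s => PySem.Str.join " " (PySem.List.slice line (some s) (some (s + pharse))))

-- ===== PRECONDITION & SPEC =====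
-- first character test used by Pre_'s reachability condition ('a' <= w[0] <= 'z' on a nonempty word)
def cmLowerFirstB (w : String) : Bool :=
  match w.toList with
  | [] => false
  | c :: _ => decide ('a' ≤ c ∧ c ≤ 'z')

-- some empty-string word sits inside a candidate window directly behind a run of
-- lowercase-starting words, so the scan reaches it and w[0] raises IndexError
def cmReachedEmpty (line : List String) (pharse : Int) : Prop :=
  ∃ q < line.length, line.getD q "" = "" ∧
    ∃ s < q + 1, (s : Int) < (line.length : Int) - pharse + 1 ∧ (q : Int) < (s : Int) + pharse ∧
      ∀ t < q, s ≤ t → cmLowerFirstB (line.getD t "") = true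

-- Pre_ excludes exactly the inputs on which A raises IndexError: pharse = 0 (A indexes
-- lens[0] on the empty lens list) and lines in which an empty-string word is reachable
-- (both programs evaluate w[0] of such a word and raise).
def Pre_comprise_morewords (line : List String) (pharse : Int) : Prop :=
  pharse ≠ 0 ∧ ¬ cmReachedEmpty line pharse
instance (line : List String) (pharse : Int) : Decidable (Pre_comprise_morewords line pharse) := by
  unfold Pre_comprise_morewords cmReachedEmpty; infer_instance

def pvWitness_comprise_morewords : List String × Int := (["big", "cats", "Run", "fast"], 2)

def Spec_comprise_morewords (line : List String) (pharse : Int) (out : List String) : Prop :=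
  out = comprise_morewords_alt line pharse
instance (line : List String) (pharse : Int) (out : List String) : Decidable (Spec_comprise_morewords line pharse out) := by
  unfold Spec_comprise_morewords; infer_instance

-- ===== CLAIM (what is proved, stated in full; the proofs are below) =====
def Claim_equal_comprise_morewords : Prop := ∀ (line : List String) (pharse : Int), Dom_comprise_morewords line pharse → Pre_comprise_morewords line pharse → Spec_comprise_morewords line pharse (comprise_morewords line pharse)

-- ===== LEMMAS AND PROOFS =====

-- proof-side abbreviations for the pieces of B's comprehension and A's loop state
def cmP (line : List String) (pharse s : Int) : Bool :=
  (PySem.List.slice line (some s) (some (s + pharse))).all cmBOk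

def cmG (line : List String) (pharse s : Int) : String :=
  PySem.Str.join " " (PySem.List.slice line (some s) (some (s + pharse)))

def cmW (line : List String) (pharse x : Int) : List Int :=
  (PySem.List.pyRange x ((line.length : Int) - pharse + 1) 1).filter (fun s => cmP line pharse s)

def cmCat (line : List String) (a d : Nat) : List Char :=
  ((line.drop a).take d).flatMap (fun w => w.toList ++ [' '])

def cmWls (line : List String) (p a : Nat) : List Int :=
  ((line.drop a).take p).map (fun w => ((w.toList.length : Nat) : Int))

lemma cmBOk_char (w : List Char) :
    ((((PySem.List.pyGet? w 0).getD ' ') > 'z' ∨ ((PySem.List.pyGet? w 0).getD ' ') < 'a')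
      ↔ ¬ ('a' ≤ ((PySem.List.pyGet? w 0).getD ' ') ∧ ((PySem.List.pyGet? w 0).getD ' ') ≤ 'z')) := by
  constructor
  · rintro (h | h) ⟨h1, h2⟩
    · exact absurd h (not_lt.mpr h2)
    · exact absurd h (not_lt.mpr h1)
  · intro h
    rcases not_and_or.mp h with h | h
    · exact Or.inr (not_le.mp h)
    · exact Or.inl (not_le.mp h)

lemma cmCat_cons (line : List String) (a d : Nat) (h : a < line.length) :
    cmCat line a (d+1) = (line.getD a "").toList ++ [' '] ++ cmCat line (a+1) d := by
  unfold cmCat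
  rw [List.drop_eq_getElem_cons h, List.take_succ_cons, List.flatMap_cons,
    List.getD_eq_getElem line "" h]

lemma cmCat_append (line : List String) (a d1 d2 : Nat) (h : a + d1 + d2 ≤ line.length) :
    cmCat line a (d1 + d2) = cmCat line a d1 ++ cmCat line (a + d1) d2 := by
  induction d1 generalizing a with
  | zero => simp [cmCat]
  | succ d ih =>
    have ha : a < line.length := by omega
    rw [show d + 1 + d2 = (d + d2) + 1 by omega, cmCat_cons line a _ ha,
      cmCat_cons line a d ha, ih (a+1) (by omega),
      show a + 1 + d = a + (d + 1) by omega]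
    simp [List.append_assoc]

lemma cmWls_cons (line : List String) (p a : Nat) (h : a < line.length) :
    cmWls line (p+1) a = ((line.getD a "").toList.length : Int) :: cmWls line p (a+1) := by
  unfold cmWls
  rw [List.drop_eq_getElem_cons h, List.take_succ_cons, List.map_cons,
    List.getD_eq_getElem line "" h]

lemma cmWls_length (line : List String) (p a : Nat) (h : a + p ≤ line.length) :
    (cmWls line p a).length = p := by
  unfold cmWls
  simp
  omega

lemma cmWls_concat (line : List String) (p a : Nat) (h : a + p + 1 ≤ line.length) :
    cmWls line (p+1) a = cmWls line p a ++ [((line.getD (a+p) "").toList.length : Int)] := by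
  unfold cmWls
  rw [List.take_succ, List.map_append]
  congr 1
  have h1 : p < (line.drop a).length := by simp; omega
  rw [List.getElem?_eq_getElem h1]
  simp [List.getElem_drop, List.getD_eq_getElem line "" (by omega : a + p < line.length),
    List.getElem?_eq_getElem (by omega : a + p < line.length)]

lemma cmCat_head (line : List String) (p a : Nat) (hp : 1 ≤ p) (h : a < line.length) :
    cmCat line a p = (line.getD a "").toList ++ [' '] ++ cmCat line (a+1) (p-1) := by
  conv_lhs => rw [show p = (p-1)+1 by omega]
  rw [cmCat_cons line a (p-1) h]

lemma cmWls_head (line : List String) (p a : Nat) (hp : 1 ≤ p) (h : a < line.length) :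
    cmWls line p a = ((line.getD a "").toList.length : Int) :: cmWls line (p-1) (a+1) := by
  conv_lhs => rw [show p = (p-1)+1 by omega]
  rw [cmWls_cons line (p-1) a h]

lemma cmWls_last (line : List String) (p a : Nat) (hp : 1 ≤ p) (h : a + p ≤ line.length) :
    cmWls line p a = cmWls line (p-1) a ++ [((line.getD (a + (p-1)) "").toList.length : Int)] := by
  conv_lhs => rw [show p = (p-1)+1 by omega]
  rw [cmWls_concat line (p-1) a (by omega)]

lemma take_set_succ (xs : List Int) (j : Nat) (v : Int) (h : j < xs.length) :
    (xs.set j v).take (j+1) = xs.take j ++ [v] := by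
  rw [List.take_succ, List.getElem?_set_self (by omega), List.take_set,
    List.set_eq_of_length_le (by simp)]
  simp

lemma cmAInner_succ (line : List String) (p : Nat) :
    ∀ (d j a : Nat) (temp : List Char) (lens : List Int),
      j + d = p → a + p ≤ line.length → lens.length = p →
      (∀ t, j ≤ t → t < p → cmBOk (line.getD (a+t) "") = true) →
      cmAInner line (p : Int) d (a : Int) (j : Int) temp lens
        = ((a : Int), (p : Int), temp ++ cmCat line (a+j) d,
           lens.take j ++ ((line.drop (a+j)).take d).map (fun w => ((w.toList.length : Nat) : Int))) := by
  intro d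
  induction d with
  | zero =>
    intro j a temp lens hjd h hlen hv
    have hj : j = p := by omega
    subst hj
    simp [cmAInner, cmCat, List.take_of_length_le (le_of_eq hlen)]
  | succ d ih =>
    intro j a temp lens hjd h hlen hv
    have hjp : j < p := by omega
    have hin : a + j < line.length := by omega
    rw [cmAInner]
    rw [if_pos (show (j : Int) < (p : Int) from by exact_mod_cast hjp)]
    have hw : ((PySem.List.pyGet? line ((a : Int) + (j : Int))).getD "") = line.getD (a+j) "" := by
      rw [show (a : Int) + (j : Int) = ((a + j : Nat) : Int) by push_cast; ring,
        PySem.List.pyGet?_natCast, List.getD_eq_getElem?_getD]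
    simp only [hw]
    have hvj := hv j le_rfl hjp
    simp only [cmBOk, decide_eq_true_eq] at hvj
    rw [if_neg (fun hcontra => (cmBOk_char _).mp hcontra hvj)]
    rw [show (j : Int) + 1 = ((j + 1 : Nat) : Int) by push_cast; ring]
    rw [show PySem.List.pySetD lens (j : Int) (((line.getD (a+j) "").toList.length : Nat) : Int)
        = lens.set j (((line.getD (a+j) "").toList.length : Nat) : Int) from by
      simpa using PySem.List.pySetD_natCast lens j _]
    rw [ih (j+1) a _ _ (by omega) h (by simp [hlen]) (fun t ht1 ht2 => hv t (by omega) ht2)]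
    simp only [Prod.mk.injEq, true_and, and_true, eq_self_iff_true]
    refine ⟨?_, ?_⟩
    · rw [show a + (j + 1) = (a + j) + 1 by omega, cmCat_cons line (a+j) d hin]
      simp [List.append_assoc]
    · rw [show a + (j + 1) = (a + j) + 1 by omega, take_set_succ lens j _ (by omega),
        List.drop_eq_getElem_cons hin, List.take_succ_cons, List.map_cons]
      simp [List.getD_eq_getElem line "" hin, List.append_assoc,
        List.getElem?_eq_getElem hin]

lemma cmAInner_fail (line : List String) (p : Nat) :
    ∀ (d j a j0 : Nat) (temp : List Char) (lens : List Int),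
      j + d = p → a + p ≤ line.length →
      j ≤ j0 → j0 < p → cmBOk (line.getD (a+j0) "") = false →
      (∀ t, j ≤ t → t < j0 → cmBOk (line.getD (a+t) "") = true) →
      ∃ lens', cmAInner line (p : Int) d (a : Int) (j : Int) temp lens
          = (((a + j0 : Nat) : Int), 0, [], lens') ∧ lens'.length = lens.length := by
  intro d
  induction d with
  | zero =>
    intro j a j0 temp lens hjd h hle hlt hbad hv
    omega
  | succ d ih =>
    intro j a j0 temp lens hjd h hle hlt hbad hv
    have hjp : j < p := by omega
    have hin : a + j < line.length := by omega
    rw [cmAInner]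
    rw [if_pos (show (j : Int) < (p : Int) from by exact_mod_cast hjp)]
    have hw : ((PySem.List.pyGet? line ((a : Int) + (j : Int))).getD "") = line.getD (a+j) "" := by
      rw [show (a : Int) + (j : Int) = ((a + j : Nat) : Int) by push_cast; ring,
        PySem.List.pyGet?_natCast, List.getD_eq_getElem?_getD]
    simp only [hw]
    rcases eq_or_lt_of_le hle with heq | hlt2
    · subst heq
      simp only [cmBOk, decide_eq_false_iff_not] at hbad
      rw [if_pos ((cmBOk_char _).mpr hbad)]
      exact ⟨lens, by rw [show (a : Int) + (j : Int) = ((a + j : Nat) : Int) by push_cast; ring], rfl⟩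
    · have hvj := hv j le_rfl hlt2
      simp only [cmBOk, decide_eq_true_eq] at hvj
      rw [if_neg (fun hcontra => (cmBOk_char _).mp hcontra hvj)]
      rw [show (j : Int) + 1 = ((j + 1 : Nat) : Int) by push_cast; ring]
      obtain ⟨lens', heq, hlen'⟩ := ih (j+1) a j0 (temp ++ (line.getD (a+j) "").toList ++ [' '])
        (PySem.List.pySetD lens (j : Int) (((line.getD (a+j) "").toList.length : Nat) : Int))
        (by omega) h (by omega) hlt hbad (fun t ht1 ht2 => hv t (by omega) ht2)
      refine ⟨lens', heq, ?_⟩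
      rw [hlen']
      simpa using congrArg List.length (PySem.List.pySetD_natCast lens j (((line.getD (a+j) "").toList.length : Nat) : Int))

lemma drop_set_of_lt (xs : List Int) (m k : Nat) (v : Int) (h : m < k) :
    (xs.set m v).drop k = xs.drop k := by
  apply List.ext_getElem (by simp)
  intro i h1 h2
  simp only [List.getElem_drop]
  apply List.getElem_set_ne
  omega

lemma cmShift (f : List Int → Int → List Int)
    (hf : f = fun ls k => PySem.List.pySetD ls k (PySem.List.pyGetD ls (k+1) 0)) :
    ∀ (d m : Nat) (xs : List Int), m + d + 1 = xs.length →
      (PySem.List.pyRange (m : Int) ((m : Int) + (d : Int)) 1).foldl f xs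
        = xs.take m ++ xs.drop (m+1) ++ [xs.getD (xs.length - 1) 0] := by
  subst hf
  intro d
  induction d with
  | zero =>
    intro m xs hm
    rw [show (m : Int) + ((0 : Nat) : Int) = (m : Int) by simp, PySem.List.pyRange_one_eq_nil le_rfl]
    simp only [List.foldl_nil]
    have h1 : xs.take (m+1) = xs := List.take_of_length_le (by omega)
    conv_lhs => rw [← h1]
    rw [List.take_succ, List.getElem?_eq_getElem (by omega : m < xs.length),
      show m + 1 = xs.length from by omega, List.drop_length,
      List.getD_eq_getElem xs 0 (by omega : xs.length - 1 < xs.length)]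
    simp [show xs.length - 1 = m by omega]
  | succ d ih =>
    intro m xs hm
    rw [PySem.List.pyRange_one_cons (by push_cast; omega), List.foldl_cons]
    have hv : PySem.List.pyGetD xs ((m : Int) + 1) 0 = xs[m+1]'(by omega) := by
      rw [show (m : Int) + 1 = ((m + 1 : Nat) : Int) by push_cast; ring]
      rw [PySem.List.pyGetD_natCast, List.getD_eq_getElem xs 0 (by omega : m + 1 < xs.length)]
    have hset : PySem.List.pySetD xs (m : Int) (PySem.List.pyGetD xs ((m : Int) + 1) 0)
        = xs.set m (xs[m+1]'(by omega)) := by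
      rw [hv]; simpa using PySem.List.pySetD_natCast xs m _
    simp only [hset]
    rw [show (m : Int) + ((d + 1 : Nat) : Int) = ((m + 1 : Nat) : Int) + ((d : Nat) : Int) by push_cast; ring,
      show ((m : Int) + 1) = ((m + 1 : Nat) : Int) by push_cast; ring]
    rw [ih (m+1) _ (by rw [List.length_set]; omega)]
    rw [take_set_succ xs m _ (by omega), drop_set_of_lt xs m (m+2) _ (by omega)]
    have hlast : (xs.set m (xs[m+1]'(by omega))).getD ((xs.set m (xs[m+1]'(by omega))).length - 1) 0
        = xs.getD (xs.length - 1) 0 := by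
      rw [List.length_set,
        List.getD_eq_getElem (xs.set m (xs[m+1]'(by omega))) 0 (by rw [List.length_set]; omega),
        List.getD_eq_getElem xs 0 (by omega : xs.length - 1 < xs.length)]
      apply List.getElem_set_ne
      omega
    rw [hlast, List.drop_eq_getElem_cons (by omega : m + 1 < xs.length)]
    simp [List.append_assoc]

lemma cmShift' (d m : Nat) (s e : Int) (hs : s = (m : Int)) (he : e = (m : Int) + (d : Int))
    (xs : List Int) (hlen : m + d + 1 = xs.length) :
    (PySem.List.pyRange s e 1).foldl
        (fun ls k => PySem.List.pySetD ls k (PySem.List.pyGetD ls (k+1) 0)) xs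
      = xs.take m ++ xs.drop (m+1) ++ [xs.getD (xs.length - 1) 0] := by
  subst hs he
  exact cmShift _ rfl d m xs hlen

lemma cmP_true_iff (line : List String) (p a : Nat) (h : a + p ≤ line.length) :
    cmP line (p : Int) (a : Int) = true ↔ ∀ t, t < p → cmBOk (line.getD (a+t) "") = true := by
  unfold cmP
  rw [PySem.List.slice_natCast_add]
  rw [List.all_eq_true]
  constructor
  · intro hall t ht
    have h1 : t < ((line.drop a).take p).length := by simp; omega
    have h2 : ((line.drop a).take p)[t]'h1 = line.getD (a+t) "" := by
      rw [List.getElem_take, List.getElem_drop, List.getD_eq_getElem line "" (by omega)]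
    exact h2 ▸ hall _ (List.getElem_mem h1)
  · intro hv w hw
    obtain ⟨t, ht, hwt⟩ := List.getElem_of_mem hw
    have hlt : t < p := by simp at ht; omega
    have hweq : w = line.getD (a+t) "" := by
      rw [← hwt, List.getElem_take, List.getElem_drop, List.getD_eq_getElem line "" (by omega)]
    rw [hweq]
    exact hv t hlt

lemma cmP_false (line : List String) (p a q : Nat) (hq : q < p) (h : a + p ≤ line.length)
    (hbad : cmBOk (line.getD (a+q) "") = false) :
    cmP line (p : Int) (a : Int) = false := by
  have := cmP_true_iff line p a h
  rcases Bool.eq_false_or_eq_true (cmP line (p : Int) (a : Int)) with ht | hf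
  · exact absurd ((this.mp ht) q hq) (by rw [hbad]; simp)
  · exact hf

lemma cmW_skip (line : List String) (pharse : Int) :
    ∀ (d a : Nat),
      (∀ s : Nat, a ≤ s → s < a + d → (s : Int) < (line.length : Int) - pharse + 1 →
        cmP line pharse (s : Int) = false) →
      cmW line pharse (a : Int) = cmW line pharse ((a + d : Nat) : Int) := by
  intro d
  induction d with
  | zero => intro a _; norm_num
  | succ d ih =>
    intro a hs
    by_cases h : (a : Int) < (line.length : Int) - pharse + 1
    · unfold cmW
      rw [PySem.List.pyRange_one_cons h, List.filter_cons,
        hs a le_rfl (by omega) h]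
      simp only [Bool.false_eq_true, if_false]
      rw [show (a : Int) + 1 = ((a + 1 : Nat) : Int) by push_cast; ring]
      have := ih (a+1) (fun s h1 h2 h3 => hs s (by omega) (by omega) h3)
      unfold cmW at this
      rw [this, show a + 1 + d = a + (d+1) by omega]
    · unfold cmW
      rw [PySem.List.pyRange_one_eq_nil (by omega), PySem.List.pyRange_one_eq_nil (by push_cast; omega)]

lemma joinChars (ws : List String) :
    PySem.Chars.join [' '] (ws.map String.toList)
      = (ws.flatMap (fun w => w.toList ++ [' '])).dropLast := by
  induction ws with
  | nil => simp [PySem.Chars.join_nil]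
  | cons w t ih =>
    cases t with
    | nil => simp [PySem.Chars.join_singleton]
    | cons x s =>
      rw [List.map_cons, List.map_cons, PySem.Chars.join_cons_cons, List.flatMap_cons]
      have hne : (x :: s).flatMap (fun w => w.toList ++ [' ']) ≠ [] := by
        simp [List.flatMap_cons]
      rw [List.dropLast_append_of_ne_nil hne, ← ih]
      simp [List.append_assoc]

lemma cmG_eq (line : List String) (p a : Nat) (h : a + p ≤ line.length) :
    String.ofList ((cmCat line a p).dropLast) = cmG line (p : Int) (a : Int) := by
  unfold cmG
  rw [show (a : Int) + (p : Int) = ((a : Int) + (p : Int)) from rfl,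
    PySem.List.slice_natCast_add]
  have h1 : (PySem.Str.join " " ((line.drop a).take p)).toList
      = PySem.Chars.join [' '] (((line.drop a).take p).map String.toList) := by
    simp [pysem]
  have h2 : (cmCat line a p).dropLast
      = (PySem.Str.join " " ((line.drop a).take p)).toList := by
    rw [h1, joinChars]
    rfl
  rw [h2]
  simp only [String.ofList_toList]

lemma cmAOuter_main (line : List String) (p : Nat) (hp : 1 ≤ p) :
    ∀ (fuel : Nat) (a : Nat) (j : Int) (temp : List Char) (lens : List Int) (result : List String),
      ((line.length : Int) - p + 1) ≤ (a : Int) + fuel →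
      ((j = 0 ∧ temp = [] ∧ lens.length = p)
        ∨ (j = (p : Int) - 1 ∧ a + p ≤ line.length + 1
            ∧ (∀ t, t < p - 1 → cmBOk (line.getD (a+t) "") = true)
            ∧ temp = cmCat line a (p-1) ∧ ∃ c, lens = cmWls line (p-1) a ++ [c])) →
      cmAOuter line (p : Int) ((line.length : Int) - p + 1) fuel (a : Int) j temp lens result
        = result ++ (cmW line (p : Int) (a : Int)).map (cmG line (p : Int)) := by
  intro fuel
  induction fuel with
  | zero =>
    intro a j temp lens result hfuel hinv
    rw [cmAOuter]
    unfold cmW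
    rw [PySem.List.pyRange_one_eq_nil (by push_cast at hfuel ⊢; omega)]
    simp
  | succ fuel ih =>
    intro a j temp lens result hfuel hinv
    by_cases hL : (a : Int) < (line.length : Int) - p + 1
    · have hap : a + p ≤ line.length := by push_cast at hL; omega
      have han : a < line.length := by omega
      have hcons : cmW line (p : Int) (a : Int)
          = (if cmP line (p : Int) (a : Int) then [(a : Int)] else [])
            ++ cmW line (p : Int) ((a + 1 : Nat) : Int) := by
        unfold cmW
        rw [PySem.List.pyRange_one_cons hL, List.filter_cons,
          show (a : Int) + 1 = ((a + 1 : Nat) : Int) by push_cast; ring]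
        split_ifs <;> simp
      have hG : String.ofList (PySem.List.slice (cmCat line a p) none (some (-1)))
          = cmG line (p : Int) (a : Int) := by
        rw [PySem.List.slice_to_neg_one, cmG_eq line p a hap]
      have hwls : ((line.drop a).take p).map (fun w => ((w.toList.length : Nat) : Int))
          = cmWls line p a := rfl
      have hhead : PySem.List.pyGetD (cmWls line p a) 0 0
          = ((line.getD a "").toList.length : Int) := by
        rw [show (0 : Int) = ((0 : Nat) : Int) by simp, PySem.List.pyGetD_natCast,
          cmWls_head line p a hp han, List.getD_cons_zero]
      have htemp2 : PySem.List.slice (cmCat line a p)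
          (some (((line.getD a "").toList.length : Int) + 1)) none
          = cmCat line (a+1) (p-1) := by
        rw [show (((line.getD a "").toList.length : Nat) : Int) + 1
            = (((line.getD a "").toList.length + 1 : Nat) : Int) by push_cast; ring,
          PySem.List.slice_from_natCast, cmCat_head line p a hp han]
        rw [show (line.getD a "").toList ++ [' '] ++ cmCat line (a+1) (p-1)
            = ((line.getD a "").toList ++ [' ']) ++ cmCat line (a+1) (p-1) by simp [List.append_assoc]]
        rw [List.drop_left' (by simp)]
      have hlen2 : (cmWls line p a).length = p := cmWls_length line p a hap
      have hshift : (PySem.List.pyRange 0 ((p : Int) - 1) 1).foldl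
          (fun ls k => PySem.List.pySetD ls k (PySem.List.pyGetD ls (k + 1) 0)) (cmWls line p a)
          = cmWls line (p-1) (a+1) ++ [((line.getD (a + (p-1)) "").toList.length : Int)] := by
        rw [cmShift' (p-1) 0 0 ((p : Int) - 1) (by simp) (by push_cast; omega)
          (cmWls line p a) (by omega)]
        rw [List.take_zero, List.nil_append, hlen2]
        have h1 : (cmWls line p a).drop 1 = cmWls line (p-1) (a+1) := by
          rw [cmWls_head line p a hp han, List.drop_one, List.tail_cons]
        have h2 : (cmWls line p a).getD (p - 1) 0
            = ((line.getD (a + (p-1)) "").toList.length : Int) := by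
          rw [cmWls_last line p a hp hap]
          rw [List.getD_eq_getElem _ 0 (by simp [cmWls_length line (p-1) a (by omega)])]
          rw [List.getElem_append_right (by rw [cmWls_length line (p-1) a (by omega)])]
          simp [cmWls_length line (p-1) a (by omega)]
        rw [h1, h2]
      rw [cmAOuter, if_pos hL]
      rcases hinv with ⟨hj, htemp, hlen⟩ | ⟨hj, hb, hvv, htemp, c, hlens⟩
      · -- fresh mode: j = 0, temp = ''
        subst hj htemp
        rw [show (((p : Int) - 0).toNat) = p by omega]
        by_cases hv : ∀ t, t < p → cmBOk (line.getD (a+t) "") = true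
        · -- whole window valid: the success branch fires
          have hinner := cmAInner_succ line p p 0 a [] lens (by omega) hap hlen
            (fun t _ ht2 => hv t ht2)
          simp only [Nat.cast_zero, Nat.add_zero, List.take_zero, List.nil_append] at hinner
          rw [hinner, hwls]
          simp only [eq_self_iff_true, if_true]
          rw [hG, hhead, htemp2, hshift,
            show (a : Int) + 1 = ((a + 1 : Nat) : Int) by push_cast; ring]
          rw [ih (a+1) ((p : Int) - 1) (cmCat line (a+1) (p-1))
            (cmWls line (p-1) (a+1) ++ [((line.getD (a + (p-1)) "").toList.length : Int)])
            (result ++ [cmG line (p : Int) (a : Int)])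
            (by push_cast at hfuel ⊢; omega)
            (Or.inr ⟨rfl, by omega, fun t ht => by
                have := hv (t+1) (by omega); rwa [show a + 1 + t = a + (t+1) by omega],
              rfl, ⟨((line.getD (a + (p-1)) "").toList.length : Int), rfl⟩⟩)]
          rw [hcons, if_pos ((cmP_true_iff line p a hap).mpr hv)]
          simp [List.append_assoc]
        · -- some word of the window invalid: the break branch fires
          have hex : ∃ t, t < p ∧ cmBOk (line.getD (a+t) "") = false := by
            push_neg at hv
            obtain ⟨t, ht, hft⟩ := hv
            exact ⟨t, ht, by simpa using hft⟩
          have hj0p : Nat.find hex < p := (Nat.find_spec hex).1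
          have hbad : cmBOk (line.getD (a + Nat.find hex) "") = false := (Nat.find_spec hex).2
          have hgood : ∀ t, 0 ≤ t → t < Nat.find hex → cmBOk (line.getD (a+t) "") = true := by
            intro t _ ht
            have hmin := Nat.find_min hex ht
            rcases Bool.eq_false_or_eq_true (cmBOk (line.getD (a+t) "")) with htr | hf
            · exact htr
            · exact absurd ⟨by omega, hf⟩ hmin
          obtain ⟨lens', hinner, hlen'⟩ := cmAInner_fail line p p 0 a (Nat.find hex) [] lens
            (by omega) hap (by omega) hj0p hbad hgood
          simp only [Nat.cast_zero] at hinner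
          rw [hinner]
          simp only []
          rw [if_neg (show ¬ ((0 : Int) = (p : Int)) by intro hcontra; omega)]
          rw [show ((a + Nat.find hex : Nat) : Int) + 1 = ((a + Nat.find hex + 1 : Nat) : Int) by push_cast; ring]
          rw [ih (a + Nat.find hex + 1) 0 [] lens' result
            (by push_cast at hfuel ⊢; omega)
            (Or.inl ⟨rfl, rfl, by omega⟩)]
          have hskip : cmW line (p : Int) (a : Int)
              = cmW line (p : Int) ((a + (Nat.find hex + 1) : Nat) : Int) := by
            apply cmW_skip line (p : Int) (Nat.find hex + 1) a
            intro s h1 h2 hsL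
            have hsp : s + p ≤ line.length := by push_cast at hsL; omega
            exact cmP_false line p s (a + Nat.find hex - s) (by omega) hsp
              (by rw [show s + (a + Nat.find hex - s) = a + Nat.find hex by omega]; exact hbad)
          rw [hskip, show a + (Nat.find hex + 1) = a + Nat.find hex + 1 by omega]
      · -- cached mode: j = pharse - 1, temp already holds the first pharse-1 words
        subst hj htemp hlens
        have hlen : (cmWls line (p-1) a ++ [c]).length = p := by
          rw [List.length_append, cmWls_length line (p-1) a (by omega)]
          simp; omega
        rw [show (((p : Int) - ((p : Int) - 1)).toNat) = 1 by omega]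
        by_cases hv : cmBOk (line.getD (a + (p-1)) "") = true
        · -- the one new word is valid: the whole window is valid
          have hvfull : ∀ t, t < p → cmBOk (line.getD (a+t) "") = true := by
            intro t ht
            rcases Nat.lt_or_ge t (p-1) with h1 | h1
            · exact hvv t h1
            · rw [show t = p - 1 by omega]; exact hv
          have hinner := cmAInner_succ line p 1 (p-1) a (cmCat line a (p-1))
            (cmWls line (p-1) a ++ [c]) (by omega) hap hlen (fun t ht1 ht2 => hvfull t ht2)
          have htemp3 : cmCat line a (p-1) ++ cmCat line (a + (p-1)) 1 = cmCat line a p := by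
            rw [← cmCat_append line a (p-1) 1 (by omega), show (p-1) + 1 = p by omega]
          have hlens3 : (cmWls line (p-1) a ++ [c]).take (p-1)
              ++ ((line.drop (a + (p-1))).take 1).map (fun w => ((w.toList.length : Nat) : Int))
              = cmWls line p a := by
            rw [List.take_left' (cmWls_length line (p-1) a (by omega))]
            rw [List.drop_eq_getElem_cons (by omega : a + (p-1) < line.length),
              List.take_succ_cons, List.take_zero, List.map_cons, List.map_nil]
            rw [cmWls_last line p a hp hap]
            simp [List.getD_eq_getElem line "" (by omega : a + (p-1) < line.length),
              List.getElem?_eq_getElem (by omega : a + (p-1) < line.length)]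
          rw [htemp3, hlens3] at hinner
          rw [show ((p - 1 : Nat) : Int) = (p : Int) - 1 by omega] at hinner
          rw [hinner]
          simp only [eq_self_iff_true, if_true]
          rw [hG, hhead, htemp2, hshift,
            show (a : Int) + 1 = ((a + 1 : Nat) : Int) by push_cast; ring]
          rw [ih (a+1) ((p : Int) - 1) (cmCat line (a+1) (p-1))
            (cmWls line (p-1) (a+1) ++ [((line.getD (a + (p-1)) "").toList.length : Int)])
            (result ++ [cmG line (p : Int) (a : Int)])
            (by push_cast at hfuel ⊢; omega)
            (Or.inr ⟨rfl, by omega, fun t ht => by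
                have := hvfull (t+1) (by omega); rwa [show a + 1 + t = a + (t+1) by omega],
              rfl, ⟨((line.getD (a + (p-1)) "").toList.length : Int), rfl⟩⟩)]
          rw [hcons, if_pos ((cmP_true_iff line p a hap).mpr hvfull)]
          simp [List.append_assoc]
        · -- the new word is invalid: break and jump past it
          have hbad : cmBOk (line.getD (a + (p-1)) "") = false := by
            rcases Bool.eq_false_or_eq_true (cmBOk (line.getD (a + (p-1)) "")) with htr | hf
            · exact absurd htr hv
            · exact hf
          obtain ⟨lens', hinner, hlen'⟩ := cmAInner_fail line p 1 (p-1) a (p-1)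
            (cmCat line a (p-1)) (cmWls line (p-1) a ++ [c])
            (by omega) hap le_rfl (by omega) hbad (fun t ht1 ht2 => absurd ht1 (by omega))
          rw [show ((p - 1 : Nat) : Int) = (p : Int) - 1 by omega] at hinner
          rw [hinner]
          simp only []
          rw [if_neg (show ¬ ((0 : Int) = (p : Int)) by intro hcontra; omega)]
          rw [show ((a + (p-1) : Nat) : Int) + 1 = ((a + (p-1) + 1 : Nat) : Int) by push_cast; ring]
          rw [ih (a + (p-1) + 1) 0 [] lens' result
            (by push_cast at hfuel ⊢; omega)
            (Or.inl ⟨rfl, rfl, by rw [hlen', hlen]⟩)]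
          have hskip : cmW line (p : Int) (a : Int)
              = cmW line (p : Int) ((a + p : Nat) : Int) := by
            apply cmW_skip line (p : Int) p a
            intro s h1 h2 hsL
            have hsp : s + p ≤ line.length := by push_cast at hsL; omega
            exact cmP_false line p s (a + (p-1) - s) (by omega) hsp
              (by rw [show s + (a + (p-1) - s) = a + (p-1) by omega]; exact hbad)
          rw [hskip, show a + (p-1) + 1 = a + p by omega]
    · rw [cmAOuter, if_neg hL]
      unfold cmW
      rw [PySem.List.pyRange_one_eq_nil (by omega)]
      simp

lemma cmAOuter_neg (line : List String) (pharse L : Int) (h : pharse < 0) :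
    ∀ (fuel : Nat) (i : Int) (temp : List Char) (lens : List Int) (result : List String),
      cmAOuter line pharse L fuel i 0 temp lens result = result := by
  intro fuel
  induction fuel with
  | zero => intro i temp lens result; rfl
  | succ fuel ih =>
    intro i temp lens result
    rw [cmAOuter]
    by_cases hi : i < L
    · rw [if_pos hi, show ((pharse - 0).toNat) = 0 by omega]
      rw [show cmAInner line pharse 0 i 0 temp lens = (i, 0, temp, lens) from rfl]
      simp only []
      rw [if_neg (by intro hcontra; omega : ¬ ((0 : Int) = pharse))]
      exact ih (i+1) temp lens result
    · rw [if_neg hi]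

-- ===== VERDICT (by name: the statement is the Claim_ definition above) =====
theorem comprise_morewords_spec : Claim_equal_comprise_morewords := by
  intro line pharse hdom hpre
  unfold Spec_comprise_morewords
  obtain ⟨hne, -⟩ := hpre
  rcases lt_or_gt_of_ne hne with hneg | hpos
  · -- pharse < 0: A's loop body never fires, B returns [] at the guard
    simp only [comprise_morewords, comprise_morewords_alt]
    rw [if_pos (by omega : pharse < 1)]
    exact cmAOuter_neg line pharse _ hneg _ 0 [] _ []
  · -- pharse ≥ 1
    have hp1 : 1 ≤ pharse.toNat := by omega
    have hcast : pharse = ((pharse.toNat : Nat) : Int) := by omega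
    simp only [comprise_morewords, comprise_morewords_alt]
    rw [if_neg (by omega : ¬ pharse < 1)]
    rw [hcast]
    have hmain := cmAOuter_main line pharse.toNat hp1
      (((line.length : Int) - (pharse.toNat : Int) + 1).toNat) 0 0 []
      (List.replicate pharse.toNat 0) []
      (by simpa using Int.self_le_toNat ((line.length : Int) - (pharse.toNat : Int) + 1))
      (Or.inl ⟨rfl, rfl, by simp⟩)
    simp only [Nat.cast_zero] at hmain
    simp only [Int.toNat_natCast]
    rw [hmain, List.nil_append]
    rfl
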